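-- pv_equiv track=rewrite | github.com/ma-wolpers/blattwerk | app/ui/blatt_ui_editor.py | _extract_validation_content_and_base_line
-- ===== SOURCE A (Python) =====
-- def _extract_validation_content_and_base_line(markdown_text: str) -> tuple[str, int]:
--     """Returns validator content plus 1-based base line in original markdown."""
--
--     lines = markdown_text.splitlines(keepends=True)
--     content_start_line = 1
--     content_raw = markdown_text
--
--     if lines and lines[0].strip() == "---":
--         for line_index in range(1, len(lines)):
--             if lines[line_index].strip() == "---":
--                 content_start_line = line_index + 2
--                 content_raw = "".join(lines[line_index + 1 :])
--                 break
--
--     content_for_validation = content_raw.strip()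
--     if not content_for_validation:
--         return "", content_start_line
--
--     leading_removed_chars = len(content_raw) - len(content_raw.lstrip())
--     leading_removed_text = content_raw[:leading_removed_chars]
--     leading_removed_lines = leading_removed_text.count("\n")
--     base_line = content_start_line + leading_removed_lines
--     return content_for_validation, max(1, base_line)
-- ===== SOURCE B (Python) =====
-- def _line_span(s: str, start: int) -> int:
--     """Index just past the line starting at ``start``, including its terminator."""
--     i = start
--     n = len(s)
--     while i < n and s[i] != "\r" and s[i] != "\n":
--         i += 1
--     if i < n:
--         if s[i] == "\r" and i + 1 < n and s[i + 1] == "\n":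
--             return i + 2
--         return i + 1
--     return i
--
--
-- def _extract_validation_content_and_base_line(markdown_text: str) -> tuple[str, int]:
--     """Returns validator content plus 1-based base line in original markdown."""
--
--     content_start_line = 1
--     content_raw = markdown_text
--     n = len(markdown_text)
--
--     # front-matter detection by index scanning instead of splitlines/join
--     if n and markdown_text[: _line_span(markdown_text, 0)].strip() == "---":
--         pos = _line_span(markdown_text, 0)
--         line_no = 1  # 0-based index of the line starting at pos
--         while pos < n:
--             end = _line_span(markdown_text, pos)
--             if markdown_text[pos:end].strip() == "---":
--                 content_start_line = line_no + 2
--                 content_raw = markdown_text[end:]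
--                 break
--             pos = end
--             line_no += 1
--
--     content_for_validation = content_raw.strip()
--     if not content_for_validation:
--         return "", content_start_line
--
--     # count newlines among the leading whitespace in one pass
--     blank_newlines = 0
--     for ch in content_raw:
--         if not ch.isspace():
--             break
--         if ch == "\n":
--             blank_newlines += 1
--     return content_for_validation, max(1, content_start_line + blank_newlines)
-- ===== Notes on version B (the rewrite author's own statement) =====
-- stated objective: alternative
-- what changed: B replaces A's splitlines(keepends=True)+join materialisation of all lines with direct index scanning over the original string (a _line_span cursor), and replaces the lstrip/len/slice/newline-count computation of the leading blank-line count with a single left-to-right pass that stops at the first non-whitespace character.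
import Mathlib
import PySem

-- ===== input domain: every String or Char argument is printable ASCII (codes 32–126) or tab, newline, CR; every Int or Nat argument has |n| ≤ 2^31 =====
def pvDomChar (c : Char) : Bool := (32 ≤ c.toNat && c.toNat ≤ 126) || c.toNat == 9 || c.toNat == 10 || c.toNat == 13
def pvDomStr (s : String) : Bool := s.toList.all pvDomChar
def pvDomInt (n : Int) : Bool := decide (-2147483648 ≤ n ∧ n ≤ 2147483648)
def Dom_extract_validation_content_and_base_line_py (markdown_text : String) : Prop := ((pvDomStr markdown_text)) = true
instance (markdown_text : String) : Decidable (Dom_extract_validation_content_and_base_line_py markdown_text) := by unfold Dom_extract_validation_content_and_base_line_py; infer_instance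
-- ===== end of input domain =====

-- B scans the original string with an index cursor (no splitlines/join materialisation)
-- and counts leading-whitespace newlines in one pass; same return value as A (alternative decomposition).


-- ===== PORT A =====
-- markdown_text.splitlines(keepends=True), accumulator = current line reversed.
-- Exact on the task's input domain (printable ASCII + tab + '\n' + '\r'), where Python
-- breaks lines exactly at '\n', '\r' and '\r\n'.
def pvA_splitKeep (s acc : List Char) : List (List Char) :=
  match s with
  | [] => if acc = [] then [] else [acc.reverse]
  | c :: rest =>
    if c = '\r' then
      if rest.head? = some '\n' then (acc.reverse ++ ['\r', '\n']) :: pvA_splitKeep rest.tail []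
      else (acc.reverse ++ ['\r']) :: pvA_splitKeep rest []
    else if c = '\n' then (acc.reverse ++ ['\n']) :: pvA_splitKeep rest []
    else pvA_splitKeep rest (c :: acc)
termination_by s.length
decreasing_by all_goals (simp [List.length_tail]; try omega)

-- the 'for line_index in range(1, len(lines)): … break' loop of A
def pvA_loop (lines : List (List Char)) (i : Nat) (csl : Int) (raw : List Char) : Int × List Char :=
  if h : i < lines.length then
    if PySem.Chars.strip lines[i] = ['-', '-', '-'] then
      -- "".join(lines[line_index + 1:])
      ((i : Int) + 2, PySem.Chars.join [] (PySem.List.slice lines (some ((i : Int) + 1)) none))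
    else pvA_loop lines (i + 1) csl raw
  else (csl, raw)

def extract_validation_content_and_base_line_py (markdown_text : String) : String × Int :=
  let lines := pvA_splitKeep markdown_text.toList []
  let st :=
    if lines ≠ [] ∧ PySem.Chars.strip (lines.headD []) = ['-', '-', '-'] then
      pvA_loop lines 1 1 markdown_text.toList
    else (1, markdown_text.toList)
  let content_for_validation := PySem.Chars.strip st.2
  if content_for_validation = [] then ("", st.1)
  else
    let leading_removed_chars : Nat := st.2.length - (PySem.Chars.lstrip st.2).length
    let leading_removed_text := PySem.List.slice st.2 none (some (leading_removed_chars : Int))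
    -- leading_removed_text.count("\n"): counting a single-character substring is
    -- exactly counting occurrences of that character
    let leading_removed_lines : Int := (leading_removed_text.count '\n' : Int)
    (String.mk content_for_validation, max 1 (st.1 + leading_removed_lines))

-- ===== PORT B =====
-- the 'while i < n and s[i] != "\r" and s[i] != "\n"' loop of _line_span
def pvB_lineSpanLoop (s : List Char) (i : Nat) : Nat :=
  if h : i < s.length then
    if s[i] = '\r' ∨ s[i] = '\n' then i
    else pvB_lineSpanLoop s (i + 1)
  else i
termination_by s.length - i

theorem pvB_lineSpanLoop_ge (s : List Char) (i : Nat) : i ≤ pvB_lineSpanLoop s i := by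
  unfold pvB_lineSpanLoop
  split
  · split
    · exact le_refl _
    · have := pvB_lineSpanLoop_ge s (i + 1); omega
  · exact le_refl _
termination_by s.length - i

def pvB_lineSpan (s : List Char) (start : Nat) : Nat :=
  -- 's[i] == "\r" and i + 1 < n and s[i+1] == "\n"': the two last conjuncts are s[i+1]? = some '\n'
  if hi : pvB_lineSpanLoop s start < s.length then
    if s[pvB_lineSpanLoop s start] = '\r' ∧ s[pvB_lineSpanLoop s start + 1]? = some '\n' then
      pvB_lineSpanLoop s start + 2
    else pvB_lineSpanLoop s start + 1
  else pvB_lineSpanLoop s start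

theorem pvB_lineSpan_gt (s : List Char) (pos : Nat) (h : pos < s.length) :
    pos < pvB_lineSpan s pos := by
  have h1 := pvB_lineSpanLoop_ge s pos
  unfold pvB_lineSpan
  split
  · split <;> omega
  · omega

-- the 'while pos < n: …' scan of B
def pvB_loop (s : List Char) (pos : Nat) (lineNo : Nat) : Int × List Char :=
  if h : pos < s.length then
    -- markdown_text[pos:end] with 0 ≤ pos ≤ end ≤ n: exactly (s.take end).drop pos
    if PySem.Chars.strip ((s.take (pvB_lineSpan s pos)).drop pos) = ['-', '-', '-'] then
      ((lineNo : Int) + 2, s.drop (pvB_lineSpan s pos))  -- markdown_text[end:]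
    else pvB_loop s (pvB_lineSpan s pos) (lineNo + 1)
  else (1, s)
termination_by s.length - pos
decreasing_by have := pvB_lineSpan_gt s pos h; omega

-- the 'for ch in content_raw: …' blank-newline counter of B
def pvB_countBlank : List Char → Nat
  | [] => 0
  | c :: rest =>
    if ¬ PySem.Chars.isspace c then 0
    else if c = '\n' then pvB_countBlank rest + 1
    else pvB_countBlank rest

def extract_validation_content_and_base_line_py_alt (markdown_text : String) : String × Int :=
  let s := markdown_text.toList
  let st :=
    if s.length ≠ 0 ∧ PySem.Chars.strip (s.take (pvB_lineSpan s 0)) = ['-', '-', '-'] then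
      pvB_loop s (pvB_lineSpan s 0) 1
    else (1, s)
  let content_for_validation := PySem.Chars.strip st.2
  if content_for_validation = [] then ("", st.1)
  else (String.mk content_for_validation, max 1 (st.1 + (pvB_countBlank st.2 : Int)))

-- ===== PRECONDITION & SPEC =====
def Spec_extract_validation_content_and_base_line_py (markdown_text : String) (out : String × Int) : Prop := out = extract_validation_content_and_base_line_py_alt markdown_text
instance (markdown_text : String) (out : String × Int) : Decidable (Spec_extract_validation_content_and_base_line_py markdown_text out) := by unfold Spec_extract_validation_content_and_base_line_py; infer_instance

-- ===== CLAIM (what is proved, stated in full; the proofs are below) =====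
def Claim_equal_extract_validation_content_and_base_line_py : Prop := ∀ (markdown_text : String), Dom_extract_validation_content_and_base_line_py markdown_text → Spec_extract_validation_content_and_base_line_py markdown_text (extract_validation_content_and_base_line_py markdown_text)

-- ===== LEMMAS AND PROOFS =====

-- length of the first line (with its terminator) of a char list
def pvFirstSpan : List Char → Nat
  | [] => 0
  | c :: rest =>
    if c = '\r' then (if rest.head? = some '\n' then 2 else 1)
    else if c = '\n' then 1
    else 1 + pvFirstSpan rest

theorem pvFirstSpan_pos (s : List Char) (h : s ≠ []) : 0 < pvFirstSpan s := by
  cases s with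
  | nil => exact absurd rfl h
  | cons c rest => simp only [pvFirstSpan]; split <;> [split <;> omega; split <;> omega]

theorem pvFirstSpan_le (s : List Char) : pvFirstSpan s ≤ s.length := by
  induction s with
  | nil => simp [pvFirstSpan]
  | cons c rest ih =>
    simp only [pvFirstSpan, List.length_cons]
    split
    · split
      · rename_i hh; cases rest <;> simp_all
      · omega
    · split <;> omega

-- the common reference scan: first '---' line in u (u starts at 0-based line lineNo)
def pvFind (u : List Char) (lineNo : Nat) : Option (Int × List Char) :=
  if hu : u = [] then none
  else
    if PySem.Chars.strip (u.take (pvFirstSpan u)) = ['-', '-', '-'] then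
      some ((lineNo : Int) + 2, u.drop (pvFirstSpan u))
    else pvFind (u.drop (pvFirstSpan u)) (lineNo + 1)
termination_by u.length
decreasing_by
  have h1 := pvFirstSpan_pos u hu
  have h2 : u.length ≠ 0 := by simpa using (List.length_pos_of_ne_nil hu).ne'
  simp only [List.length_drop]
  omega

-- "".join over lists of chars is flatten
theorem pvJoin_empty (parts : List (List Char)) : PySem.Chars.join [] parts = parts.flatten := by
  induction parts with
  | nil => rfl
  | cons a t ih =>
    cases t with
    | nil => simp [PySem.Chars.join, List.intercalate, List.intersperse]
    | cons b t' =>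
      simp only [PySem.Chars.join, List.intercalate, List.intersperse] at ih ⊢
      simp only [List.flatten_cons] at ih ⊢
      simp [ih]

-- (A) splitlines peels off exactly the first pvFirstSpan characters
theorem pvA_splitKeep_eq (s : List Char) : ∀ acc : List Char,
    pvA_splitKeep s acc =
      if s = [] ∧ acc = [] then []
      else (acc.reverse ++ s.take (pvFirstSpan s)) :: pvA_splitKeep (s.drop (pvFirstSpan s)) [] := by
  induction s with
  | nil =>
    intro acc
    by_cases h : acc = [] <;> simp [pvA_splitKeep, pvFirstSpan, h]
  | cons c rest ih =>
    intro acc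
    simp only [pvA_splitKeep, pvFirstSpan]
    by_cases hr : c = '\r'
    · subst hr
      by_cases hh : rest.head? = some '\n'
      · cases rest with
        | nil => simp at hh
        | cons d rest' =>
          simp only [List.head?] at hh
          injection hh with hd
          subst hd
          simp
      · simp [hh]
    · by_cases hn : c = '\n'
      · subst hn; simp [hr]
      · rw [if_neg hr, if_neg hn, if_neg hr, if_neg hn]
        rw [ih (c :: acc)]
        have hne : ¬ (rest = [] ∧ c :: acc = []) := by simp
        rw [if_neg hne]
        rw [Nat.add_comm 1 (pvFirstSpan rest)]
        simp [List.take_succ_cons, List.drop_succ_cons]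

theorem pvA_lines_cons (s : List Char) (h : s ≠ []) :
    pvA_splitKeep s [] =
      s.take (pvFirstSpan s) :: pvA_splitKeep (s.drop (pvFirstSpan s)) [] := by
  rw [pvA_splitKeep_eq]; simp [h]

theorem pvA_splitKeep_flatten (s : List Char) : (pvA_splitKeep s []).flatten = s := by
  induction hn : s.length using Nat.strong_induction_on generalizing s with
  | _ n ih =>
    by_cases h : s = []
    · subst h; simp [pvA_splitKeep]
    · rw [pvA_lines_cons s h]
      have hpos := pvFirstSpan_pos s h
      have hlen : s.length ≠ 0 := by simpa using (List.length_pos_of_ne_nil h).ne'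
      rw [List.flatten_cons,
        ih (s.drop (pvFirstSpan s)).length (by simp [List.length_drop]; omega) _ rfl]
      exact List.take_append_drop _ s

-- (B) lineSpan computes pos + pvFirstSpan of the suffix
theorem pvB_lineSpan_eq (s : List Char) : ∀ pos : Nat, pos ≤ s.length →
    pvB_lineSpan s pos = pos + pvFirstSpan (s.drop pos) := by
  intro pos hpos
  induction hm : s.length - pos generalizing pos with
  | zero =>
    have hp : pos = s.length := by omega
    subst hp
    unfold pvB_lineSpan pvB_lineSpanLoop
    simp [List.drop_length, pvFirstSpan]
  | succ k ih =>
    have hlt : pos < s.length := by omega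
    have hdrop : s.drop pos = s[pos] :: s.drop (pos + 1) := List.drop_eq_getElem_cons hlt
    by_cases ht : s[pos] = '\r' ∨ s[pos] = '\n'
    · -- the inner loop stops immediately at pos
      have hloop : pvB_lineSpanLoop s pos = pos := by
        unfold pvB_lineSpanLoop; simp [hlt, ht]
      unfold pvB_lineSpan
      rw [hloop, dif_pos hlt]
      by_cases hr : s[pos] = '\r'
      · by_cases hnl : s[pos + 1]? = some '\n'
        · rw [if_pos ⟨hr, hnl⟩, hdrop]
          simp [pvFirstSpan, hr, List.head?_drop, hnl]
        · rw [if_neg (fun hc => hnl hc.2), hdrop]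
          simp [pvFirstSpan, hr, List.head?_drop, hnl]
      · have hn : s[pos] = '\n' := ht.resolve_left hr
        rw [if_neg (fun hc => hr hc.1), hdrop]
        simp [pvFirstSpan, hr, hn]
    · -- the inner loop steps
      push_neg at ht
      have hloop : pvB_lineSpanLoop s pos = pvB_lineSpanLoop s (pos + 1) := by
        conv_lhs => unfold pvB_lineSpanLoop
        simp [hlt, ht.1, ht.2]
      have hstep : pvB_lineSpan s pos = pvB_lineSpan s (pos + 1) := by
        simp only [pvB_lineSpan, hloop]
      rw [hstep, ih (pos + 1) (by omega) (by omega), hdrop]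
      simp [pvFirstSpan, ht.1, ht.2]
      omega

-- B's scan loop computes pvFind
theorem pvB_loop_eq (s : List Char) : ∀ pos lineNo : Nat, pos ≤ s.length →
    pvB_loop s pos lineNo = (pvFind (s.drop pos) lineNo).getD (1, s) := by
  intro pos lineNo
  induction hm : s.length - pos using Nat.strong_induction_on generalizing pos lineNo with
  | _ n ih =>
    intro hpos
    by_cases hlt : pos < s.length
    · have hne : s.drop pos ≠ [] := by simp [List.drop_eq_nil_iff]; omega
      have hspan := pvB_lineSpan_eq s pos hpos
      have hfle := pvFirstSpan_le (s.drop pos)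
      have hfpos := pvFirstSpan_pos _ hne
      have hdlen : (s.drop pos).length = s.length - pos := by simp
      unfold pvB_loop
      rw [dif_pos hlt, pvFind, dif_neg hne]
      have hseg : (s.take (pvB_lineSpan s pos)).drop pos
          = (s.drop pos).take (pvFirstSpan (s.drop pos)) := by
        rw [hspan, List.drop_take]
        congr 1
        omega
      have hrest : s.drop (pvB_lineSpan s pos) = (s.drop pos).drop (pvFirstSpan (s.drop pos)) := by
        rw [hspan, List.drop_drop]
      simp only [hseg, hrest]
      split
      · rfl
      · rw [ih (s.length - pvB_lineSpan s pos) (by omega) (pvB_lineSpan s pos) (lineNo + 1) rfl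
          (by omega), hrest]
    · have hp : pos = s.length := by omega
      subst hp
      unfold pvB_loop
      rw [dif_neg (by omega), List.drop_length, pvFind]
      simp
-- A's for loop computes pvFind
theorem pvA_loop_eq (u : List Char) : ∀ (pre : List (List Char)) (csl : Int) (raw : List Char),
    pvA_loop (pre ++ pvA_splitKeep u []) pre.length csl raw
      = (pvFind u pre.length).getD (csl, raw) := by
  induction hn : u.length using Nat.strong_induction_on generalizing u with
  | _ n ih =>
    intro pre csl raw
    by_cases h : u = []
    · subst h
      unfold pvA_loop
      rw [pvFind]
      simp [pvA_splitKeep]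
    · have hfpos := pvFirstSpan_pos u h
      have hulen : u.length ≠ 0 := by simpa using (List.length_pos_of_ne_nil h).ne'
      rw [pvA_lines_cons u h]
      rw [pvFind, dif_neg h]
      unfold pvA_loop
      have hlen : pre.length < (pre ++ u.take (pvFirstSpan u) :: pvA_splitKeep (u.drop (pvFirstSpan u)) []).length := by
        simp
      rw [dif_pos hlen]
      have hget : (pre ++ u.take (pvFirstSpan u) :: pvA_splitKeep (u.drop (pvFirstSpan u)) [])[pre.length]'hlen
          = u.take (pvFirstSpan u) := by
        rw [List.getElem_append_right (le_refl pre.length)]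
        simp
      rw [hget]
      split
      · -- found: slice from i+1 is the remaining lines; their flatten is the suffix
        have hslice : PySem.List.slice (pre ++ u.take (pvFirstSpan u) :: pvA_splitKeep (u.drop (pvFirstSpan u)) [])
            (some ((pre.length : Int) + 1)) none
            = pvA_splitKeep (u.drop (pvFirstSpan u)) [] := by
          rw [PySem.List.slice_from _ (by omega : (0 : Int) ≤ (pre.length : Int) + 1)]
          have ht : ((pre.length : Int) + 1).toNat = (pre ++ [u.take (pvFirstSpan u)]).length := by
            simp
            try omega
          rw [ht, show pre ++ u.take (pvFirstSpan u) :: pvA_splitKeep (u.drop (pvFirstSpan u)) []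
              = (pre ++ [u.take (pvFirstSpan u)]) ++ pvA_splitKeep (u.drop (pvFirstSpan u)) [] by simp]
          exact List.drop_left
        rw [hslice, pvJoin_empty, pvA_splitKeep_flatten]
        rfl
      · -- not found at this line: step
        have h1 : pre ++ u.take (pvFirstSpan u) :: pvA_splitKeep (u.drop (pvFirstSpan u)) []
            = (pre ++ [u.take (pvFirstSpan u)]) ++ pvA_splitKeep (u.drop (pvFirstSpan u)) [] := by simp
        have h2 : pre.length + 1 = (pre ++ [u.take (pvFirstSpan u)]).length := by simp
        rw [h1, h2]
        rw [ih (u.drop (pvFirstSpan u)).length (by simp only [List.length_drop]; omega) _ rfl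
          (pre ++ [u.take (pvFirstSpan u)]) csl raw]

-- the one-pass blank counter equals count '\n' of the whitespace prefix
theorem pvB_countBlank_eq (raw : List Char) :
    pvB_countBlank raw = (raw.takeWhile PySem.Chars.isspace).count '\n' := by
  induction raw with
  | nil => simp [pvB_countBlank]
  | cons c rest ih =>
    simp only [pvB_countBlank]
    by_cases hs : PySem.Chars.isspace c
    · rw [if_neg (by simp [hs])]
      rw [List.takeWhile_cons_of_pos hs]
      by_cases hn : c = '\n'
      · subst hn; simp [List.count_cons, ih]
      · simp [List.count_cons, hn, ih]
    · rw [if_pos (by simp [hs]), List.takeWhile_cons_of_neg (by simp [hs])]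
      simp

-- A's lstrip-based leading newline count equals B's one-pass counter
theorem pvA_leading_eq (raw : List Char) :
    (PySem.List.slice raw none (some ((raw.length - (PySem.Chars.lstrip raw).length : Nat) : Int))).count '\n'
      = pvB_countBlank raw := by
  rw [PySem.List.slice_to _ (by omega)]
  rw [pvB_countBlank_eq]
  have hls : PySem.Chars.lstrip raw = raw.dropWhile PySem.Chars.isspace := rfl
  have hlen : raw.length - (PySem.Chars.lstrip raw).length
      = (raw.takeWhile PySem.Chars.isspace).length := by
    rw [hls]
    have hadd : (raw.takeWhile PySem.Chars.isspace).length
        + (raw.dropWhile PySem.Chars.isspace).length = raw.length := by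
      rw [← List.length_append, List.takeWhile_append_dropWhile]
    omega
  rw [show ((raw.length - (PySem.Chars.lstrip raw).length : Nat) : Int).toNat
      = raw.length - (PySem.Chars.lstrip raw).length by omega]
  rw [hlen]
  congr 1
  exact (List.prefix_iff_eq_take.mp (List.takeWhile_prefix _)).symm

-- ===== VERDICT (by name: the statement is the Claim_ definition above) =====
theorem extract_validation_content_and_base_line_py_spec : Claim_equal_extract_validation_content_and_base_line_py := by
  intro markdown_text _
  unfold Spec_extract_validation_content_and_base_line_py
  simp only [extract_validation_content_and_base_line_py, extract_validation_content_and_base_line_py_alt]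
  set s := markdown_text.toList with hs
  by_cases hnil : s = []
  · rw [hnil]
    simp [pvA_splitKeep, pvB_countBlank, PySem.Chars.strip, PySem.Chars.lstrip, PySem.Chars.rstrip]
  · have hlines := pvA_lines_cons s hnil
    have hlnz : s.length ≠ 0 := by simpa using (List.length_pos_of_ne_nil hnil).ne'
    have h0 : pvB_lineSpan s 0 = pvFirstSpan s := by
      rw [pvB_lineSpan_eq s 0 (by omega)]; simp
    have hhead : (pvA_splitKeep s []).headD [] = s.take (pvFirstSpan s) := by
      simp [hlines]
    have hne : pvA_splitKeep s [] ≠ [] := by rw [hlines]; simp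
    have hst : (if pvA_splitKeep s [] ≠ [] ∧ PySem.Chars.strip ((pvA_splitKeep s []).headD []) = ['-', '-', '-'] then
          pvA_loop (pvA_splitKeep s []) 1 1 s
        else (1, s))
        = (if s.length ≠ 0 ∧ PySem.Chars.strip (s.take (pvB_lineSpan s 0)) = ['-', '-', '-'] then
          pvB_loop s (pvB_lineSpan s 0) 1
        else (1, s)) := by
      rw [hhead, h0]
      by_cases hc : PySem.Chars.strip (s.take (pvFirstSpan s)) = ['-', '-', '-']
      · rw [if_pos ⟨hne, hc⟩, if_pos ⟨hlnz, hc⟩]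
        have hA := pvA_loop_eq (s.drop (pvFirstSpan s)) [s.take (pvFirstSpan s)] 1 s
        simp only [List.singleton_append, List.length_singleton] at hA
        rw [← hlines] at hA
        rw [hA, pvB_loop_eq s (pvFirstSpan s) 1 (pvFirstSpan_le s)]
      · rw [if_neg (by simp [hc]), if_neg (by simp [hc])]
    rw [hst]
    set st := (if s.length ≠ 0 ∧ PySem.Chars.strip (s.take (pvB_lineSpan s 0)) = ['-', '-', '-'] then
          pvB_loop s (pvB_lineSpan s 0) 1
        else (1, s)) with hstdef
    by_cases hempty : PySem.Chars.strip st.2 = []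
    · simp [hempty]
    · simp only [if_neg hempty]
      rw [pvA_leading_eq st.2]
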